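-- pv_equiv track=rewrite | github.com/ATidiane/TAL | TMEs/TME6/TME6.py | ngrammes
-- ===== SOURCE A (Python) =====
-- def ngrammes(corpuspp, n):
--     """  Transforme le corpus en ngrams
--     """
--     ngrams = []
--     for t, topic in enumerate(corpuspp):
--         ngrams.append([])
--         for d in topic:
--             d = d.split()
--             ngrams[t].append([[''.join(d[i:j]) for j in range(i+1,min(i+n+1,len(d)+1))] for i in range(len(d))])
--
--     return ngrams
-- ===== SOURCE B (Python) =====
-- def _doc_ngrams(d, n):
--     out = []
--     for i in range(len(d)):
--         cur = ''
--         row = []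
--         for k in range(min(n, len(d) - i)):
--             cur += d[i + k]
--             row.append(cur)
--         out.append(row)
--     return out
--
--
-- def ngrammes(corpuspp, n):
--     """Transforme le corpus en ngrams (incremental accumulation, no re-joining)."""
--     return [[_doc_ngrams(d.split(), n) for d in topic] for topic in corpuspp]
-- ===== Notes on version B (the rewrite author's own statement) =====
-- stated objective: simpler
-- what changed: Each document's n-grams are built by an incremental accumulator (cur += next word, appending cur after each step) in a small helper, instead of re-joining a fresh slice d[i:j] for every pair (i,j); the mutating append loops become comprehensions.
import Mathlib
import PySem

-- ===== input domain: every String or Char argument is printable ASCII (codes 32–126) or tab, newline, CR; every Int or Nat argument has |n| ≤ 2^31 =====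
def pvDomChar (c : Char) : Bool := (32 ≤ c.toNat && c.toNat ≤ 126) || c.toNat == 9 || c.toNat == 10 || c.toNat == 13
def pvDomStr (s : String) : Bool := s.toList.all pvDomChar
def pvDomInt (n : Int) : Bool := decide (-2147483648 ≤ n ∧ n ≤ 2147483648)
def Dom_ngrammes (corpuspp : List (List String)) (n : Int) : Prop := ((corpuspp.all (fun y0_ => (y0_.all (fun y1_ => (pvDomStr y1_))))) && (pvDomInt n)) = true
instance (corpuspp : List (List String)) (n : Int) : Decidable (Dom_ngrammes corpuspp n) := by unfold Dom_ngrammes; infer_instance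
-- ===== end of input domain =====

-- B builds each n-gram incrementally from the previous one (cur += word) instead of
-- re-joining a fresh slice for every (i, j); objective: simpler/constant-factor cleaner, same results.

-- ===== PORT A =====
-- A: append an empty topic list, then for each document append the nested
-- slice-and-join comprehension; the two mutating loops become foldl-with-append.
def ngrammes (corpuspp : List (List String)) (n : Int) : List (List (List (List String))) :=
  corpuspp.foldl (fun ngrams topic =>
    ngrams ++ [topic.foldl (fun acc dstr =>
      let d := PySem.Str.split₀ dstr
      acc ++ [(PySem.List.pyRange 0 (d.length : Int) 1).map (fun i =>
        (PySem.List.pyRange (i + 1) (min (i + n + 1) ((d.length : Int) + 1)) 1).map (fun j =>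
          PySem.Str.join "" (PySem.List.slice d (some i) (some j))))]) []]) []

-- ===== PORT B =====
-- helper _doc_ngrams of Source B: per start index i, accumulate cur += d[i+k]
def pvDocNgrams (d : List String) (n : Int) : List (List String) :=
  (PySem.List.pyRange 0 (d.length : Int) 1).foldl (fun out i =>
    out ++ [((PySem.List.pyRange 0 (min n ((d.length : Int) - i)) 1).foldl
      (fun (st : String × List String) k =>
        let c := st.1 ++ PySem.List.pyGetD d (i + k) ""
        (c, st.2 ++ [c])) ("", [])).2]) []

def ngrammes_alt (corpuspp : List (List String)) (n : Int) : List (List (List (List String))) :=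
  corpuspp.map (fun topic => topic.map (fun dstr => pvDocNgrams (PySem.Str.split₀ dstr) n))

-- ===== PRECONDITION & SPEC =====
def Spec_ngrammes (corpuspp : List (List String)) (n : Int) (out : List (List (List (List String)))) : Prop := out = ngrammes_alt corpuspp n
instance (corpuspp : List (List String)) (n : Int) (out : List (List (List (List String)))) : Decidable (Spec_ngrammes corpuspp n out) := by unfold Spec_ngrammes; infer_instance

-- ===== CLAIM (what is proved, stated in full; the proofs are below) =====
def Claim_equal_ngrammes : Prop := ∀ (corpuspp : List (List String)) (n : Int), Dom_ngrammes corpuspp n → Spec_ngrammes corpuspp n (ngrammes corpuspp n)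

-- ===== LEMMAS AND PROOFS =====

-- ''.join(xs + [y]) = ''.join(xs) + y, on the Chars side
theorem pv_charsJoin_snoc (xs : List (List Char)) (y : List Char) :
    PySem.Chars.join [] (xs ++ [y]) = PySem.Chars.join [] xs ++ y := by
  induction xs with
  | nil => simp [PySem.Chars.join_nil, PySem.Chars.join_singleton]
  | cons a t ih =>
    cases t with
    | nil => simp [PySem.Chars.join_singleton, PySem.Chars.join_cons_cons]
    | cons b t' =>
      rw [List.cons_append, PySem.Chars.join_cons_cons]
      rw [List.cons_append] at ih ⊢
      rw [PySem.Chars.join_cons_cons] at *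
      simp only [List.nil_append, List.append_assoc] at *
      rw [ih]

theorem pv_join_snoc (xs : List String) (y : String) :
    PySem.Str.join "" (xs ++ [y]) = PySem.Str.join "" xs ++ y := by
  apply String.toList_inj.mp
  simp only [PySem.Str.toList_join, String.toList_append, List.map_append, List.map_cons,
    List.map_nil]
  have : ("" : String).toList = ([] : List Char) := rfl
  rw [this, pv_charsJoin_snoc]

theorem pv_join_nil : PySem.Str.join "" ([] : List String) = "" := by
  apply String.toList_inj.mp
  simp [PySem.Str.toList_join]

-- the inner accumulator fold computes joins of growing prefixes of d.drop i
theorem pv_fold_inv (d : List String) (i : Nat) (m : Nat) (h : i + m ≤ d.length) :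
    (List.range m).foldl
      (fun (st : String × List String) (k : Nat) =>
        let c := st.1 ++ PySem.List.pyGetD d ((i : Int) + (k : Int)) ""
        (c, st.2 ++ [c])) ("", []) =
    (PySem.Str.join "" ((d.drop i).take m),
     (List.range m).map (fun k => PySem.Str.join "" ((d.drop i).take (k + 1)))) := by
  induction m with
  | zero => simp [pv_join_nil]
  | succ m ih =>
    have h' : i + m ≤ d.length := by omega
    rw [List.range_succ, List.foldl_append, ih h', List.map_append]
    simp only [List.foldl_cons, List.foldl_nil, List.map_cons, List.map_nil]
    have hget : PySem.List.pyGetD d ((i : Int) + (m : Int)) "" = d.getD (i + m) "" := by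
      have : (i : Int) + (m : Int) = ((i + m : Nat) : Int) := by push_cast; ring
      rw [this, PySem.List.pyGetD_natCast]
    have hlt : i + m < d.length := by omega
    have htake : (d.drop i).take (m + 1) = (d.drop i).take m ++ [d.getD (i + m) ""] := by
      rw [List.take_add_one]
      have : (d.drop i)[m]? = some d[i + m] := by
        rw [List.getElem?_drop]
        exact List.getElem?_eq_getElem hlt
      rw [this]
      simp [List.getD, List.getElem?_eq_getElem hlt]
    rw [hget, htake, pv_join_snoc]

-- per-document equality: A's slice-and-join rows = B's accumulator rows
theorem pv_doc_eq (d : List String) (n : Int) :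
    (PySem.List.pyRange 0 (d.length : Int) 1).map (fun i =>
        (PySem.List.pyRange (i + 1) (min (i + n + 1) ((d.length : Int) + 1)) 1).map (fun j =>
          PySem.Str.join "" (PySem.List.slice d (some i) (some j)))) =
    pvDocNgrams d n := by
  unfold pvDocNgrams
  rw [PySem.List.foldl_append_singleton_eq_map]
  simp only [List.nil_append]
  apply List.map_congr_left
  intro i hi
  have hi' := PySem.List.mem_pyRange_one.mp hi
  obtain ⟨i', rfl⟩ : ∃ i' : Nat, (i' : Int) = i := ⟨i.toNat, Int.toNat_of_nonneg hi'.1⟩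
  have hiL : i' < d.length := by exact_mod_cast hi'.2
  -- both ranges have the same (possibly empty) extent m
  by_cases hn : n ≤ 0
  · have h1 : min ((i' : Int) + n + 1) ((d.length : Int) + 1) ≤ (i' : Int) + 1 := by omega
    have h2 : min n ((d.length : Int) - (i' : Int)) ≤ 0 := by omega
    rw [PySem.List.pyRange_one_eq_nil h1, PySem.List.pyRange_one_eq_nil h2]
    simp
  · push Not at hn
    set m : Nat := (min n ((d.length : Int) - (i' : Int))).toNat with hm
    have hmle : i' + m ≤ d.length := by omega
    have hmin1 : min ((i' : Int) + n + 1) ((d.length : Int) + 1) = (i' : Int) + 1 + (m : Int) := by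
      simp only [hm]; omega
    have hmin2 : min n ((d.length : Int) - (i' : Int)) = (m : Int) := by
      simp only [hm]; omega
    rw [hmin1, hmin2, PySem.List.pyRange_zero_natCast, List.foldl_map]
    rw [pv_fold_inv d i' m hmle]
    rw [PySem.List.pyRange_one]
    have : ((i' : Int) + 1 + (m : Int) - ((i' : Int) + 1)).toNat = m := by omega
    rw [this, List.map_map]
    apply List.map_congr_left
    intro k hk
    simp only [Function.comp_apply]
    have : (i' : Int) + 1 + (k : Int) = (i' : Int) + ((k + 1 : Nat) : Int) := by push_cast; ring
    rw [this, PySem.List.slice_natCast_add]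

-- ===== VERDICT (by name: the statement is the Claim_ definition above) =====
theorem ngrammes_spec : Claim_equal_ngrammes := by
  intro corpuspp n _
  show ngrammes corpuspp n = ngrammes_alt corpuspp n
  unfold ngrammes ngrammes_alt
  rw [PySem.List.foldl_append_singleton_eq_map]
  simp only [List.nil_append]
  apply List.map_congr_left
  intro topic _
  rw [PySem.List.foldl_append_singleton_eq_map]
  simp only [List.nil_append]
  apply List.map_congr_left
  intro dstr _
  exact pv_doc_eq (PySem.Str.split₀ dstr) n
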